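-- pv_equiv track=rewrite | github.com/usanli/SWE599 | phase2_multiagent_website_builder/multiagent_website_builder.py | parse_ui_design_spec
-- ===== SOURCE A (Python) =====
-- def parse_ui_design_spec(design_spec):
--     """
--     Parses the UI design specification to extract individual page designs.
--     Expects a markdown-formatted string with ## Page headings.
--     Returns a dictionary with page names as keys and their design specs as values.
--     """
--     page_designs = {}
--     current_page = None
--     current_content = []
--
--     # Split by lines and process
--     lines = design_spec.split('\n')
--     for line in lines:
--         # Check if this is a page header (## Page Name)
--         if line.strip().startswith('## '):
--             # If we were already collecting a page, save it
--             if current_page: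
--                 page_designs[current_page] = '\n'.join(current_content)
--                 current_content = []
--
--             # Start a new page
--             current_page = line.strip()[3:].strip()  # Remove '## ' prefix
--             current_content.append(line)  # Include the header in the content
--         elif current_page:
--             # Add to current page content
--             current_content.append(line)
--
--     # Add the last page if there is one
--     if current_page and current_content:
--         page_designs[current_page] = '\n'.join(current_content)
--
--     return page_designs
-- ===== SOURCE B (Python) =====
-- def _is_header(line):
--     return line.strip().startswith('## ')
--
--
-- def _take_body(lines):
--     # lines until the next header (the body of the current page, header excluded)
--     body = []
--     for ln in lines:
--         if _is_header(ln):
--             break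
--         body.append(ln)
--     return body
--
--
-- def parse_ui_design_spec(design_spec):
--     """Segment-at-a-time parse: consume one whole page per step instead of a
--     line-by-line accumulator; later duplicate page names overwrite."""
--     pages = {}
--     rest = design_spec.split('\n')
--     while rest:
--         line = rest[0]
--         if _is_header(line):
--             body = _take_body(rest[1:])
--             name = line.strip()[3:].strip()
--             pages[name] = '\n'.join([line] + body)
--             rest = rest[1 + len(body):]
--         else:
--             rest = rest[1:]
--     return pages
-- ===== Notes on version B (the rewrite author's own statement) =====
-- stated objective: alternative
-- what changed: Replaces A's line-by-line fold with current-page/current-content accumulator state by a segment-at-a-time scanner: skip to a header line, take the whole body until the next header in one inner scan, store the joined segment, and continue after it.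
import Mathlib
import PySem

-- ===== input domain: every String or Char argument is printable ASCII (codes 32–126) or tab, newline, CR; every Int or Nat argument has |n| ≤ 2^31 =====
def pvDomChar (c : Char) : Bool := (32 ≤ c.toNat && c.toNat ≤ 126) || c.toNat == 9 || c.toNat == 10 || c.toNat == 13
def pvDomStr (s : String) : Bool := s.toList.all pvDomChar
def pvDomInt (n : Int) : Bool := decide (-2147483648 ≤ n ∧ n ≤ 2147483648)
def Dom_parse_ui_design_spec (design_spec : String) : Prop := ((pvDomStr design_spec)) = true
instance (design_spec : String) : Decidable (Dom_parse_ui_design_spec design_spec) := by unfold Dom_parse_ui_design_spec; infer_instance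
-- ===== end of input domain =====

-- B replaces A's line-by-line accumulator by a segment-at-a-time scanner (alternative decomposition, same cost).

-- ===== PORT A =====
-- `line.strip().startswith('## ')` (the header test, identical text in both Pythons)
def pvHeader (line : String) : Bool :=
  PySem.Str.startswith (PySem.Str.strip line) "## "

-- `line.strip()[3:].strip()` (the page name, identical text in both Pythons)
def pvName (line : String) : String :=
  PySem.Str.strip (PySem.Str.slice (PySem.Str.strip line) (some 3) none)

-- truthiness of `current_page` (None or a str)
def pvTruthy (cur : Option String) : Bool :=
  match cur with
  | some p => p != ""
  | none => false

-- the body of A's `for line in lines` loop; state = (page_designs, current_page, current_content)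
def pvStepA (st : PySem.Dict String String × Option String × List String) (line : String) :
    PySem.Dict String String × Option String × List String :=
  if pvHeader line then
    let d' := if pvTruthy st.2.1 then st.1.insert ((st.2.1).getD "") (PySem.Str.join "\n" st.2.2) else st.1
    let content' := if pvTruthy st.2.1 then ([] : List String) else st.2.2
    (d', some (pvName line), content' ++ [line])
  else
    if pvTruthy st.2.1 then (st.1, st.2.1, st.2.2 ++ [line]) else st

-- `if current_page and current_content: page_designs[current_page] = '\n'.join(current_content)`
def pvFinalA (st : PySem.Dict String String × Option String × List String) :
    PySem.Dict String String :=
  if pvTruthy st.2.1 && !st.2.2.isEmpty then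
    st.1.insert ((st.2.1).getD "") (PySem.Str.join "\n" st.2.2)
  else st.1

def parse_ui_design_spec (design_spec : String) : List (String × String) :=
  let lines := (PySem.Str.split? design_spec "\n").getD []  -- sep "\n" ≠ "", so split? is always `some`
  (pvFinalA (lines.foldl pvStepA (PySem.Dict.empty, none, []))).items

-- ===== PORT B =====
-- `_take_body(lines)`: the for-loop with break IS takeWhile
def pvTakeBody (ls : List String) : List String :=
  ls.takeWhile (fun l => !pvHeader l)

-- B's `while rest:` loop; `rest[1+len(body):]` from rest = line :: t is t.drop body.length
def pvGoB : PySem.Dict String String → List String → PySem.Dict String String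
  | pages, [] => pages
  | pages, line :: t =>
    if pvHeader line then
      let body := pvTakeBody t
      pvGoB (pages.insert (pvName line) (PySem.Str.join "\n" (line :: body))) (t.drop body.length)
    else pvGoB pages t
  termination_by _ ls => ls.length
  decreasing_by
    all_goals simp

def parse_ui_design_spec_alt (design_spec : String) : List (String × String) :=
  (pvGoB PySem.Dict.empty ((PySem.Str.split? design_spec "\n").getD [])).items

-- ===== PRECONDITION & SPEC =====
def Spec_parse_ui_design_spec (design_spec : String) (out : List (String × String)) : Prop := out = parse_ui_design_spec_alt design_spec
instance (design_spec : String) (out : List (String × String)) : Decidable (Spec_parse_ui_design_spec design_spec out) := by unfold Spec_parse_ui_design_spec; infer_instance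

-- ===== CLAIM (what is proved, stated in full; the proofs are below) =====
def Claim_equal_parse_ui_design_spec : Prop := ∀ (design_spec : String), Dom_parse_ui_design_spec design_spec → Spec_parse_ui_design_spec design_spec (parse_ui_design_spec design_spec)

-- ===== LEMMAS AND PROOFS =====

-- a non-space character in cs survives strip
lemma pv_strip_ne_nil_of_mem {c : Char} {cs : List Char} (hc : c ∈ cs)
    (hsp : PySem.Chars.isspace c = false) : PySem.Chars.strip cs ≠ [] := by
  intro h0
  unfold PySem.Chars.strip PySem.Chars.rstrip PySem.Chars.lstrip at h0
  rw [List.reverse_eq_nil_iff, List.dropWhile_eq_nil_iff] at h0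
  have hcin : c ∈ List.dropWhile PySem.Chars.isspace cs := by
    rcases List.mem_append.mp (by rw [List.takeWhile_append_dropWhile]; exact hc :
        c ∈ List.takeWhile PySem.Chars.isspace cs ++ List.dropWhile PySem.Chars.isspace cs) with h1 | h1
    · exact absurd (List.mem_takeWhile_imp h1) (by simp [hsp])
    · exact h1
  have := h0 c (List.mem_reverse.mpr hcin)
  simp [hsp] at this

-- the first element of a dropWhile result fails the predicate
lemma pv_head_dropWhile_false {α : Type} (p : α → Bool) :
    ∀ (l : List α) (x : α) (xs : List α), List.dropWhile p l = x :: xs → p x = false := by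
  intro l
  induction l with
  | nil => intro x xs h; simp [List.dropWhile] at h
  | cons a t ih =>
    intro x xs h
    by_cases ha : p a
    · rw [List.dropWhile_cons_of_pos ha] at h; exact ih x xs h
    · rw [List.dropWhile_cons_of_neg ha] at h
      cases h; simpa using ha

-- a header line always yields a nonempty page name
lemma pvName_ne_empty (l : String) (h : pvHeader l = true) : pvName l ≠ "" := by
  intro h0
  unfold pvHeader at h
  unfold pvName at h0
  have h0' : PySem.Chars.strip (List.drop 3 (PySem.Chars.strip l.toList)) = [] := by
    have h1 := congrArg String.toList h0
    simp only [PySem.Str.toList_strip, PySem.Str.toList_slice,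
      PySem.Chars.slice_eq_listSlice] at h1
    rw [PySem.List.slice_from _ (by norm_num : (0:Int) ≤ 3)] at h1
    simpa using h1
  rw [PySem.Str.startswith_eq, PySem.Str.toList_strip, PySem.Chars.startswith_iff] at h
  have htl : ("## ".toList) = ['#', '#', ' '] := by decide
  obtain ⟨u, hu⟩ := h
  rw [htl] at hu
  have hdrop : List.drop 3 (PySem.Chars.strip l.toList) = u := by rw [← hu]; simp
  have hrev : (PySem.Chars.strip l.toList).reverse =
      List.dropWhile PySem.Chars.isspace (PySem.Chars.lstrip l.toList).reverse := by
    unfold PySem.Chars.strip PySem.Chars.rstrip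
    rw [List.reverse_reverse]
  have hrev2 : (PySem.Chars.strip l.toList).reverse = u.reverse ++ [' ', '#', '#'] := by
    rw [← hu]; simp
  rw [hdrop] at h0'
  rcases hru : u.reverse with _ | ⟨x, v⟩
  · have hsp : PySem.Chars.isspace ' ' = false :=
      pv_head_dropWhile_false _ _ ' ' ['#', '#'] (by rw [← hrev, hrev2, hru]; simp)
    have : PySem.Chars.isspace ' ' = true := by decide
    rw [this] at hsp; cases hsp
  · have hxf : PySem.Chars.isspace x = false :=
      pv_head_dropWhile_false _ _ x (v ++ [' ', '#', '#']) (by rw [← hrev, hrev2, hru]; simp)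
    have hxu : x ∈ u := by rw [← List.mem_reverse, hru]; simp
    exact pv_strip_ne_nil_of_mem hxu hxf h0'

lemma pv_drop_takeWhile {α : Type} (p : α → Bool) (t : List α) :
    t.drop (t.takeWhile p).length = t.dropWhile p := by
  induction t with
  | nil => simp
  | cons a t ih =>
    by_cases ha : p a
    · simp [List.takeWhile_cons_of_pos ha, List.dropWhile_cons_of_pos ha, ih]
    · simp [List.takeWhile_cons_of_neg ha, List.dropWhile_cons_of_neg ha]

-- invariant: a pending page (p, c) finishes exactly like B finishing the current segment
lemma pv_pending (ls : List String) : ∀ (d : PySem.Dict String String) (p : String)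
    (c : List String), p ≠ "" → c ≠ [] →
    pvFinalA (ls.foldl pvStepA (d, some p, c)) =
      pvGoB (d.insert p (PySem.Str.join "\n" (c ++ ls.takeWhile (fun l => !pvHeader l))))
        (ls.dropWhile (fun l => !pvHeader l)) := by
  induction ls with
  | nil =>
    intro d p c hp hc
    simp [pvFinalA, pvGoB, pvTruthy, hp, hc]
  | cons l t ih =>
    intro d p c hp hc
    rw [List.foldl_cons]
    by_cases hl : pvHeader l = true
    · have hstep : pvStepA (d, some p, c) l =
          (d.insert p (PySem.Str.join "\n" c), some (pvName l), [l]) := by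
        simp [pvStepA, hl, pvTruthy, hp]
      rw [hstep, ih _ _ _ (pvName_ne_empty l hl) (by simp)]
      rw [List.takeWhile_cons_of_neg (by simp [hl]), List.dropWhile_cons_of_neg (by simp [hl])]
      rw [pvGoB]
      simp [hl, pvTakeBody, pv_drop_takeWhile]
    · have hstep : pvStepA (d, some p, c) l = (d, some p, c ++ [l]) := by
        simp [pvStepA, hl, pvTruthy, hp]
      rw [hstep, ih _ _ _ hp (by simp)]
      rw [List.takeWhile_cons_of_pos (by simp [hl]), List.dropWhile_cons_of_pos (by simp [hl])]
      simp

lemma pv_initial (ls : List String) (d : PySem.Dict String String) :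
    pvFinalA (ls.foldl pvStepA (d, none, [])) = pvGoB d ls := by
  induction ls generalizing d with
  | nil => simp [pvFinalA, pvGoB, pvTruthy]
  | cons l t ih =>
    rw [List.foldl_cons]
    by_cases hl : pvHeader l = true
    · have hstep : pvStepA (d, none, []) l = (d, some (pvName l), [l]) := by
        simp [pvStepA, hl, pvTruthy]
      rw [hstep, pv_pending t d (pvName l) [l] (pvName_ne_empty l hl) (by simp)]
      rw [pvGoB]
      simp [hl, pvTakeBody, pv_drop_takeWhile]
    · have hstep : pvStepA (d, none, []) l = (d, none, []) := by
        simp [pvStepA, hl, pvTruthy]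
      rw [hstep, ih, pvGoB]
      simp [hl]

-- ===== VERDICT (by name: the statement is the Claim_ definition above) =====
theorem parse_ui_design_spec_spec : Claim_equal_parse_ui_design_spec := by
  intro ds _
  unfold Spec_parse_ui_design_spec parse_ui_design_spec parse_ui_design_spec_alt
  exact congrArg PySem.Dict.items (pv_initial _ _)
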